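-- pv_equiv track=rewrite | github.com/wrmsr/omlish | x/formats/goyaml/parsing.py | new_line_character_num
-- ===== SOURCE A (Python) =====
-- def new_line_character_num(src: str) -> int:
--     num = 0
--     i = -1
--     while True:
--         i += 1
--         if not (i < len(src)):
--             break
--         if src[i] == '\r':
--             if len(src) > i + 1 and src[i + 1] == '\n':
--                 i += 1
--             num += 1
--         elif src[i] == '\n':
--             num += 1
--     return num
-- ===== SOURCE B (Python) =====
-- def new_line_character_num(src: str) -> int:
--     # Backward scan: count '\n' always; count '\r' only when the char after it
--     # (remembered from the previous iteration) is not '\n', so '\r\n' counts once.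
--     num = 0
--     nxt = None
--     for c in reversed(src):
--         if c == '\n' or (c == '\r' and nxt != '\n'):
--             num += 1
--         nxt = c
--     return num
-- ===== Notes on version B (the rewrite author's own statement) =====
-- stated objective: alternative
-- what changed: A's forward index loop with a stateful two-char skip on '\r\n' is replaced by a skip-free backward scan that counts every '\n' and counts '\r' only when the remembered following character is not '\n'.
import Mathlib
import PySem

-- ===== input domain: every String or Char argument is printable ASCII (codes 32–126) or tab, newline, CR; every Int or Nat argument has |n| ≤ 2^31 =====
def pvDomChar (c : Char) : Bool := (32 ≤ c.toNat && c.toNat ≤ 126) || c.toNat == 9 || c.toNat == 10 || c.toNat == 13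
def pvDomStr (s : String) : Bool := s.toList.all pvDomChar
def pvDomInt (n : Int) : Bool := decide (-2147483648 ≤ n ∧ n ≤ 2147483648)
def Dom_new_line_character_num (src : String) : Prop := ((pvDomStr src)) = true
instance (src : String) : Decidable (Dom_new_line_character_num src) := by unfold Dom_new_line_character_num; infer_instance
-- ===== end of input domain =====

-- B replaces A's forward index loop (with its two-char skip over '\r\n') by a skip-free
-- backward scan that remembers the following character; same O(n) cost, different structure.

-- ===== PORT A =====
-- A's while loop: at '\r' count 1 and additionally consume a following '\n'; at '\n' count 1;
-- otherwise move on.  Ported as structural recursion on the char list, branches in A's order.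
def nlcGo : List Char → Int
  | [] => 0
  | c :: rest =>
    if c = '\r' then
      match rest with
      | '\n' :: rest' => 1 + nlcGo rest'
      | r => 1 + nlcGo r
    else if c = '\n' then 1 + nlcGo rest
    else nlcGo rest

def new_line_character_num (src : String) : Int := nlcGo src.toList

-- ===== PORT B =====
-- Source B: loop over reversed(src); state = (num, nxt) with nxt : Option Char (None initially).
def nlcStep (st : Int × Option Char) (c : Char) : Int × Option Char :=
  (st.1 + (if c = '\n' ∨ (c = '\r' ∧ st.2 ≠ some '\n') then 1 else 0), some c)

def new_line_character_num_alt (src : String) : Int :=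
  (src.toList.reverse.foldl nlcStep (0, none)).1

-- ===== PRECONDITION & SPEC =====
def Spec_new_line_character_num (src : String) (out : Int) : Prop := out = new_line_character_num_alt src
instance (src : String) (out : Int) : Decidable (Spec_new_line_character_num src out) := by unfold Spec_new_line_character_num; infer_instance

-- ===== CLAIM (what is proved, stated in full; the proofs are below) =====
def Claim_equal_new_line_character_num : Prop := ∀ (src : String), Dom_new_line_character_num src → Spec_new_line_character_num src (new_line_character_num src)

-- ===== LEMMAS AND PROOFS =====

-- B's backward foldl, rewritten as a foldr over the original list (proof helper)
def nlcF (l : List Char) : Int × Option Char :=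
  l.foldr (fun c st => nlcStep st c) (0, none)

theorem nlcF_cons (c : Char) (t : List Char) : nlcF (c :: t) = nlcStep (nlcF t) c := rfl

theorem nlcF_snd (l : List Char) : (nlcF l).2 = l.head? := by
  cases l <;> rfl

theorem nlcGo_eq_nlcF (l : List Char) : nlcGo l = (nlcF l).1 := by
  induction l with
  | nil => rw [nlcGo.eq_def]; rfl
  | cons c t ih =>
    rw [nlcF_cons]
    by_cases hr : c = '\r'
    · subst hr
      cases t with
      | nil =>
        have e : nlcGo ['\r'] = 1 + nlcGo [] := by rw [nlcGo.eq_def]; rfl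
        have e2 : nlcGo ([] : List Char) = 0 := by rw [nlcGo.eq_def]
        rw [e, e2]
        simp only [nlcStep]
        split_ifs with h
        · norm_num [nlcF]
        · simp [nlcF] at h
      | cons c' t' =>
        by_cases hn : c' = '\n'
        · subst hn
          have e0 : nlcGo ('\r' :: '\n' :: t') = 1 + nlcGo t' := by rw [nlcGo.eq_def]; rfl
          have e1 : nlcGo ('\n' :: t') = 1 + nlcGo t' := by rw [nlcGo.eq_def]; rfl
          rw [e0, ← e1, ih]
          simp [nlcStep, nlcF_snd]
        · have e0 : nlcGo ('\r' :: c' :: t') = 1 + nlcGo (c' :: t') := by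
            rw [nlcGo.eq_def]
            dsimp only
            rw [if_pos rfl]
            split
            all_goals try rfl
            all_goals
              rename_i rest' hmatch
              simp only [List.cons.injEq] at hmatch
              exact absurd hmatch.1 hn
          rw [e0, ih]
          simp only [nlcStep, nlcF_snd, List.head?_cons]
          split_ifs with h
          · omega
          · simp [hn] at h
    · by_cases hn : c = '\n'
      · subst hn
        have e1 : nlcGo ('\n' :: t) = 1 + nlcGo t := by rw [nlcGo.eq_def]; rfl
        rw [e1, ih]
        simp only [nlcStep]
        split_ifs with h
        · omega
        · simp at h
      · have e2 : nlcGo (c :: t) = nlcGo t := by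
          rw [nlcGo.eq_def]
          dsimp only
          rw [if_neg hr, if_neg hn]
        rw [e2, ih]
        simp [nlcStep, hr, hn]

-- ===== VERDICT (by name: the statement is the Claim_ definition above) =====
theorem new_line_character_num_spec : Claim_equal_new_line_character_num := by
  intro src _
  unfold Spec_new_line_character_num new_line_character_num new_line_character_num_alt
  rw [List.foldl_reverse]
  exact nlcGo_eq_nlcF src.toList
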